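-- pv_equiv track=rewrite | github.com/golemfoundation/wildland-client | wildland/storage_backends/categorization_proxy.py | _filename_to_category_path
-- ===== SOURCE A (Python) =====
-- def _filename_to_category_path(category_path: str) -> str:
--     """
--     Convert category path, joined by underscores, to a category path joined with slashes. The
--     result will be assigned to ``path`` in subcontainer's manifest. In case of series of
--     adjacent underscores, only the first underscore is replaced with a slash, treating rest of
--     them as a part of category name. ``category_path`` is assumed to not have slash characters
--     ('/') since it is part of a file name.
--     """
--     if category_path == '_':
--         return '/_'
--
--     converted_path = '' if category_path.startswith('_') else '/'
--     idx = 0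
--     n = len(category_path)
--
--     while idx < n:
--         separator_idx = category_path.find('_', idx)
--         if separator_idx == -1:
--             converted_path += category_path[idx:]
--             break
--         converted_path += category_path[idx:separator_idx] + '/'
--         idx = separator_idx + 1
--         while idx < n and category_path[idx] == '_':
--             converted_path += '_'
--             idx += 1
--     # Result ends with '/' iff category_path ends with a single '_'
--     return converted_path[:-1] if converted_path.endswith('/') else converted_path
-- ===== SOURCE B (Python) =====
-- def _filename_to_category_path(category_path: str) -> str:
--     """Single left-to-right pass: an underscore becomes '/' exactly when the
--     previous character is not an underscore; then the usual wrapper."""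
--     if category_path == '_':
--         return '/_'
--     out = [] if category_path.startswith('_') else ['/']
--     prev = ''
--     for c in category_path:
--         out.append('/' if c == '_' and prev != '_' else c)
--         prev = c
--     res = ''.join(out)
--     return res[:-1] if res.endswith('/') else res
-- ===== Notes on version B (the rewrite author's own statement) =====
-- stated objective: simpler
-- what changed: A's outer find-next-underscore loop with slice concatenation plus an inner while copying each underscore run is replaced by a single left-to-right pass that maps each character, turning an underscore into '/' exactly when the previous character is not an underscore; the wrapper (the '_' special case, leading-slash prepend, trailing-slash strip) is kept.
import Mathlib
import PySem

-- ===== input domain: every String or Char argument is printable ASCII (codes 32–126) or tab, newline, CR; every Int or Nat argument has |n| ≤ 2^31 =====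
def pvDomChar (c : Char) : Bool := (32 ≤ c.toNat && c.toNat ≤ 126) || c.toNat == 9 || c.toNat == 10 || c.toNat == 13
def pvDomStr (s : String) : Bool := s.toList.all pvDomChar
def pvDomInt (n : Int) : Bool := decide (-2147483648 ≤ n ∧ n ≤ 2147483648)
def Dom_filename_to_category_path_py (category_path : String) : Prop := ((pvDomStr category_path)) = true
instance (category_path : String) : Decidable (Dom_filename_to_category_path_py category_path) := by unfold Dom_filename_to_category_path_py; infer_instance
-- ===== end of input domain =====

-- B replaces A's find/slice outer loop with inner underscore-run loop by a single
-- left-to-right pass tracking only the previous character (objective: simpler).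

-- ===== PORT A =====
-- inner while loop: copies a run of underscores, returns (copied, remaining suffix)
def pvAInner : List Char → List Char × List Char
  | [] => ([], [])
  | c :: cs =>
    if c == '_' then
      let p := pvAInner cs
      ('_' :: p.1, p.2)
    else ([], c :: cs)

theorem pvAInner_snd_length_le (cs : List Char) : (pvAInner cs).2.length ≤ cs.length := by
  induction cs with
  | nil => simp [pvAInner]
  | cons c cs ih =>
    simp only [pvAInner]
    split
    · exact Nat.le_succ_of_le ih
    · simp

-- outer while loop: find('_', idx) = dropWhile/takeWhile split of the remaining suffix;
-- the slice category_path[idx:separator_idx] is the takeWhile part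
def pvAOuter (cs : List Char) : List Char :=
  match h : cs.dropWhile (fun c => c != '_') with
  | [] => cs.takeWhile (fun c => c != '_')   -- find returned -1: append the rest and break
  | _ :: after =>
    cs.takeWhile (fun c => c != '_') ++ '/' :: ((pvAInner after).1 ++ pvAOuter (pvAInner after).2)
termination_by cs.length
decreasing_by
  have h1 : (pvAInner after).2.length ≤ after.length := pvAInner_snd_length_le after
  have h2 : (cs.dropWhile (fun c => c != '_')).length ≤ cs.length := cs.length_dropWhile_le _
  rw [h] at h2
  simp at h2 ⊢
  omega

def filename_to_category_path_py (category_path : String) : String :=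
  if category_path = "_" then "/_"
  else
    let cs := category_path.toList
    let conv := (if PySem.Chars.startswith cs ['_'] then [] else ['/']) ++ pvAOuter cs
    String.mk (if PySem.Chars.endswith conv ['/'] then conv.dropLast else conv)

-- ===== PORT B =====
def filename_to_category_path_py_alt (category_path : String) : String :=
  if category_path = "_" then "/_"
  else
    let cs := category_path.toList
    let st := cs.foldl
      (fun (st : List Char × Option Char) c =>
        (st.1 ++ [if c == '_' && !(st.2 == some '_') then '/' else c], some c))
      ((if PySem.Chars.startswith cs ['_'] then [] else ['/']), (none : Option Char))
    let res := st.1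
    String.mk (if PySem.Chars.endswith res ['/'] then res.dropLast else res)

-- ===== PRECONDITION & SPEC =====
def Spec_filename_to_category_path_py (category_path : String) (out : String) : Prop := out = filename_to_category_path_py_alt category_path
instance (category_path : String) (out : String) : Decidable (Spec_filename_to_category_path_py category_path out) := by unfold Spec_filename_to_category_path_py; infer_instance

-- ===== CLAIM (what is proved, stated in full; the proofs are below) =====
def Claim_equal_filename_to_category_path_py : Prop := ∀ (category_path : String), Dom_filename_to_category_path_py category_path → Spec_filename_to_category_path_py category_path (filename_to_category_path_py category_path)

-- ===== LEMMAS AND PROOFS =====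

-- B's pass, with the previous-character state abstracted to "was it an underscore"
def pvCRun (pu : Bool) : List Char → List Char
  | [] => []
  | c :: cs => (if c == '_' && !pu then '/' else c) :: pvCRun (c == '_') cs

theorem pvFoldl_eq (cs : List Char) : ∀ (acc : List Char) (p : Option Char),
    (cs.foldl
      (fun (st : List Char × Option Char) c =>
        (st.1 ++ [if c == '_' && !(st.2 == some '_') then '/' else c], some c))
      (acc, p)).1 = acc ++ pvCRun (p == some '_') cs := by
  induction cs with
  | nil => intro acc p; simp [pvCRun]
  | cons c cs ih =>
    intro acc p
    simp only [List.foldl_cons, ih, pvCRun]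
    simp

theorem pvCRun_clean (cs : List Char) (h : ∀ c ∈ cs, (c == '_') = false) :
    pvCRun false cs = cs := by
  induction cs with
  | nil => rfl
  | cons c cs ih =>
    have hc := h c (by simp)
    simp only [pvCRun, hc]
    simp [ih fun x hx => h x (by simp [hx])]

theorem pvCRun_append_clean (pre : List Char) (x : List Char)
    (h : ∀ c ∈ pre, (c == '_') = false) :
    pvCRun false (pre ++ x) = pre ++ pvCRun false x := by
  induction pre with
  | nil => rfl
  | cons c cs ih =>
    have hc := h c (by simp)
    simp only [List.cons_append, pvCRun, hc]
    simp [ih fun y hy => h y (by simp [hy])]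

theorem pvCRun_true_inner (cs : List Char) :
    pvCRun true cs = (pvAInner cs).1 ++ pvCRun false (pvAInner cs).2 := by
  induction cs with
  | nil => rfl
  | cons c cs ih =>
    by_cases hc : c = '_'
    · subst hc
      simp only [pvAInner, pvCRun]
      simp [ih]
    · have hc' : (c == '_') = false := by simp [hc]
      simp [pvAInner, pvCRun, hc']

theorem pvHead_dropWhile_ne {p : Char → Bool} {cs x : List Char} {c : Char}
    (h : cs.dropWhile p = c :: x) : p c = false := by
  induction cs with
  | nil => simp [List.dropWhile] at h
  | cons a as ih =>
    rw [List.dropWhile_cons] at h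
    split at h
    · exact ih h
    · rename_i hp
      cases h
      simpa using hp

theorem pvMain : ∀ (n : Nat) (cs : List Char), cs.length ≤ n → pvAOuter cs = pvCRun false cs := by
  intro n
  induction n with
  | zero =>
    intro cs h
    have hnil : cs = [] := List.eq_nil_of_length_eq_zero (Nat.le_zero.mp h)
    subst hnil
    simp [pvAOuter, pvCRun]
  | succ n ih =>
    intro cs hlen
    have hpre : ∀ c ∈ cs.takeWhile (fun c => c != '_'), (c == '_') = false := by
      intro c hc
      have := List.mem_takeWhile_imp hc
      simpa using this
    rw [pvAOuter]
    split
    · rename_i h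
      have hcs : cs.takeWhile (fun c => c != '_') = cs := by
        conv_rhs => rw [← List.takeWhile_append_dropWhile (p := fun c => c != '_') (l := cs)]
        rw [h, List.append_nil]
      rw [hcs]
      exact (pvCRun_clean cs (fun c hc => hpre c (by rw [hcs]; exact hc))).symm
    · rename_i u after h
      have hu : u = '_' := by
        have := pvHead_dropWhile_ne h
        simpa using this
      subst hu
      have hcs : cs = cs.takeWhile (fun c => c != '_') ++ '_' :: after := by
        conv_lhs => rw [← List.takeWhile_append_dropWhile (p := fun c => c != '_') (l := cs)]
        rw [h]
      have hlen2 : (pvAInner after).2.length ≤ n := by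
        have h1 := pvAInner_snd_length_le after
        have h2 := congrArg List.length hcs
        simp at h2
        omega
      rw [ih _ hlen2]
      conv_rhs => rw [hcs]
      rw [pvCRun_append_clean _ _ hpre]
      simp only [pvCRun]
      simp [pvCRun_true_inner after]

-- ===== VERDICT (by name: the statement is the Claim_ definition above) =====
theorem filename_to_category_path_py_spec : Claim_equal_filename_to_category_path_py := by
  intro s _
  unfold Spec_filename_to_category_path_py
  unfold filename_to_category_path_py filename_to_category_path_py_alt
  by_cases hs : s = "_"
  · simp [hs]
  · simp only [if_neg hs]
    rw [pvFoldl_eq]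
    have hb : ((none : Option Char) == some '_') = false := rfl
    rw [hb, pvMain s.toList.length s.toList (le_refl _)]
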